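-- pv_equiv track=rewrite | github.com/peterjohn1298/CreditMind | core/document_processor.py | _find_earliest_marker
-- ===== SOURCE A (Python) =====
-- def _find_earliest_marker(text: str, markers: list) -> int:
--     upper = text.upper()
--     best = -1
--     for m in markers:
--         pos = upper.find(m.upper())
--         if pos != -1 and (best == -1 or pos < best):
--             best = pos
--     return best
-- ===== SOURCE B (Python) =====
-- def _find_earliest_marker(text: str, markers: list) -> int:
--     upper = text.upper()
--     ups = [m.upper() for m in markers]
--     for i in range(len(upper) + 1):
--         for m in ups:
--             if upper.startswith(m, i):
--                 return i
--     return -1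
-- ===== Notes on version B (the rewrite author's own statement) =====
-- stated objective: alternative
-- what changed: Instead of running str.find once per marker and folding the minimum position, B makes a single left-to-right scan over positions and returns the first index at which any (uppercased) marker starts, so ties and the minimum are resolved by traversal order rather than by comparison.
import Mathlib
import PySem

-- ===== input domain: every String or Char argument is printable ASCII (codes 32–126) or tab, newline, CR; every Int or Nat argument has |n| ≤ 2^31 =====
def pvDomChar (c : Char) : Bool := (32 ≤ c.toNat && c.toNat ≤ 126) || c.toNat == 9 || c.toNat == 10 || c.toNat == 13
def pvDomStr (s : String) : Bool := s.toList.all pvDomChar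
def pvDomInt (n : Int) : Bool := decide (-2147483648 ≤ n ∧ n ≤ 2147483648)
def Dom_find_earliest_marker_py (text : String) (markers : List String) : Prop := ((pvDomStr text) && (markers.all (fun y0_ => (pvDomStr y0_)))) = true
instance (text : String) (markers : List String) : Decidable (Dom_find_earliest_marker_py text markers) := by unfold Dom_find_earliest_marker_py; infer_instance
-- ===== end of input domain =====

-- B replaces the per-marker find/min fold by a single left-to-right positional scan
-- returning the first index where any uppercased marker starts (objective: alternative).

-- ===== PORT A =====
def find_earliest_marker_py (text : String) (markers : List String) : Int :=
  let upper := PySem.Str.upper text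
  markers.foldl (fun best m =>
    let pos := PySem.Str.find upper (PySem.Str.upper m)
    if pos ≠ -1 ∧ (best = -1 ∨ pos < best) then pos else best) (-1)

-- ===== PORT B =====
-- the `for i in range(len(upper)+1): … return i` loop with early return
def pvGoB (upper : List Char) (ups : List (List Char)) : List Nat → Int
  | [] => -1
  | i :: rest =>
      if ups.any (fun m => PySem.Chars.startswith (upper.drop i) m) then (i : Int)
      else pvGoB upper ups rest

def find_earliest_marker_py_alt (text : String) (markers : List String) : Int :=
  let upper := (PySem.Str.upper text).toList
  let ups := markers.map (fun m => (PySem.Str.upper m).toList)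
  pvGoB upper ups (List.range (upper.length + 1))

-- ===== PRECONDITION & SPEC =====
def Spec_find_earliest_marker_py (text : String) (markers : List String) (out : Int) : Prop := out = find_earliest_marker_py_alt text markers
instance (text : String) (markers : List String) (out : Int) : Decidable (Spec_find_earliest_marker_py text markers out) := by unfold Spec_find_earliest_marker_py; infer_instance

-- ===== CLAIM (what is proved, stated in full; the proofs are below) =====
def Claim_equal_find_earliest_marker_py : Prop := ∀ (text : String) (markers : List String), Dom_find_earliest_marker_py text markers → Spec_find_earliest_marker_py text markers (find_earliest_marker_py text markers)

-- ===== LEMMAS AND PROOFS =====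

-- "min treating -1 as +∞": the value A's fold step computes
def pvMinI (p q : Int) : Int := if p = -1 then q else if q = -1 then p else min p q

lemma pvMinI_facts (b x : Int) (hb : -1 ≤ b) (hx : -1 ≤ x) :
    -1 ≤ pvMinI b x ∧ (pvMinI b x = b ∨ pvMinI b x = x) ∧
    (pvMinI b x ≠ -1 → (b ≠ -1 → pvMinI b x ≤ b) ∧ (x ≠ -1 → pvMinI b x ≤ x)) ∧
    (pvMinI b x = -1 → b = -1 ∧ x = -1) := by
  unfold pvMinI; split_ifs <;> omega

lemma pvStepA (u : List Char) (b : Int) (m : List Char) :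
    (if PySem.Chars.find u m ≠ -1 ∧ (b = -1 ∨ PySem.Chars.find u m < b) then PySem.Chars.find u m else b)
      = pvMinI b (PySem.Chars.find u m) := by
  have h := PySem.Chars.neg_one_le_find u m
  unfold pvMinI
  split_ifs <;> omega

-- characterisation of foldl pvMinI: result ≥ -1, is b or an element, minimal among non-(-1)s
lemma pvFoldMinI (xs : List Int) (hxs : ∀ x ∈ xs, -1 ≤ x) (b : Int) (hb : -1 ≤ b) :
    -1 ≤ xs.foldl pvMinI b ∧ (xs.foldl pvMinI b = b ∨ xs.foldl pvMinI b ∈ xs) ∧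
    (xs.foldl pvMinI b ≠ -1 → (b ≠ -1 → xs.foldl pvMinI b ≤ b) ∧ ∀ x ∈ xs, x ≠ -1 → xs.foldl pvMinI b ≤ x) ∧
    (xs.foldl pvMinI b = -1 → b = -1 ∧ ∀ x ∈ xs, x = -1) := by
  induction xs generalizing b with
  | nil => simp; omega
  | cons x t ih =>
    have hx : -1 ≤ x := hxs x (by simp)
    obtain ⟨p1, p2, p3, p4⟩ := pvMinI_facts b x hb hx
    obtain ⟨i1, i2, i3, i4⟩ := ih (fun y hy => hxs y (by simp [hy])) (pvMinI b x) p1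
    simp only [List.foldl_cons]
    refine ⟨i1, ?_, ?_, ?_⟩
    · rcases i2 with h | h
      · rcases p2 with h2 | h2
        · exact Or.inl (h.trans h2)
        · exact Or.inr (by simp [h.trans h2])
      · exact Or.inr (by simp [h])
    · intro hne
      obtain ⟨j1, j2⟩ := i3 hne
      by_cases hb' : pvMinI b x = -1
      · obtain ⟨d1, d2⟩ := p4 hb'
        refine ⟨fun hbne => absurd d1 hbne, fun y hy hyne => ?_⟩
        rcases List.mem_cons.mp hy with rfl | hyt
        · exact absurd d2 hyne
        · exact j2 y hyt hyne
      · obtain ⟨q1, q2⟩ := p3 hb'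
        refine ⟨fun hbne => (j1 hb').trans (q1 hbne), fun y hy hyne => ?_⟩
        rcases List.mem_cons.mp hy with rfl | hyt
        · exact (j1 hb').trans (q2 hyne)
        · exact j2 y hyt hyne
    · intro h0
      obtain ⟨c1, c2⟩ := i4 h0
      obtain ⟨d1, d2⟩ := p4 c1
      refine ⟨d1, fun y hy => ?_⟩
      rcases List.mem_cons.mp hy with rfl | hyt
      · exact d2
      · exact c2 y hyt

-- a prefix of a dropped tail is an infix
lemma pvPrefixDropInfix {m u : List Char} {j : Nat} (h : m <+: u.drop j) : m <:+: u :=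
  h.isInfix.trans (u.drop_suffix j).isInfix

-- pvGoB returns -1 when the predicate fails everywhere
lemma pvGoB_all_false (u : List Char) (ups : List (List Char)) (l : List Nat)
    (h : ∀ i ∈ l, ¬ (ups.any (fun m => PySem.Chars.startswith (u.drop i) m)) = true) :
    pvGoB u ups l = -1 := by
  induction l with
  | nil => rfl
  | cons i t ih =>
    rw [pvGoB, if_neg (h i (by simp))]
    exact ih (fun j hj => h j (by simp [hj]))

-- pvGoB skips a failing front segment
lemma pvGoB_append (u : List Char) (ups : List (List Char)) (l₁ l₂ : List Nat)
    (h : ∀ i ∈ l₁, ¬ (ups.any (fun m => PySem.Chars.startswith (u.drop i) m)) = true) :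
    pvGoB u ups (l₁ ++ l₂) = pvGoB u ups l₂ := by
  induction l₁ with
  | nil => rfl
  | cons i t ih =>
    rw [List.cons_append, pvGoB, if_neg (h i (by simp))]
    exact ih (fun j hj => h j (by simp [hj]))

-- ===== VERDICT (by name: the statement is the Claim_ definition above) =====
theorem find_earliest_marker_py_spec : Claim_equal_find_earliest_marker_py := by
  intro text markers _
  unfold Spec_find_earliest_marker_py
  simp only [find_earliest_marker_py, find_earliest_marker_py_alt]
  have hfun : (fun (best : Int) (m : String) =>
        let pos := PySem.Str.find (PySem.Str.upper text) (PySem.Str.upper m)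
        if pos ≠ -1 ∧ (best = -1 ∨ pos < best) then pos else best)
      = fun best m => pvMinI best (PySem.Chars.find (PySem.Str.upper text).toList (PySem.Str.upper m).toList) := by
    funext b m
    have : PySem.Str.find (PySem.Str.upper text) (PySem.Str.upper m)
        = PySem.Chars.find (PySem.Str.upper text).toList (PySem.Str.upper m).toList := by
      simp
    simp only [this]
    exact pvStepA _ b _
  rw [hfun]
  rw [show (markers.foldl
        (fun best m => pvMinI best (PySem.Chars.find (PySem.Str.upper text).toList (PySem.Str.upper m).toList)) (-1))
      = (markers.map (fun m => PySem.Chars.find (PySem.Str.upper text).toList (PySem.Str.upper m).toList)).foldl pvMinI (-1)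
    from List.foldl_map.symm]
  set u : List Char := (PySem.Str.upper text).toList with hu
  set ups : List (List Char) := markers.map (fun m => (PySem.Str.upper m).toList) with hups
  have hmapeq : markers.map (fun m => PySem.Chars.find u (PySem.Str.upper m).toList)
      = ups.map (fun m => PySem.Chars.find u m) := by
    rw [hups, List.map_map]; rfl
  rw [hmapeq]
  set xs : List Int := ups.map (fun m => PySem.Chars.find u m) with hxs
  have hxge : ∀ x ∈ xs, -1 ≤ x := by
    intro x hx; rw [hxs] at hx
    obtain ⟨m, _, rfl⟩ := List.mem_map.mp hx
    exact PySem.Chars.neg_one_le_find u m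
  obtain ⟨hge, hmem, hmin, hall⟩ := pvFoldMinI xs hxge (-1) (by omega)
  set r : Int := xs.foldl pvMinI (-1) with hr
  by_cases hneg : r = -1
  · -- no marker occurs: every position fails, B returns -1 too
    rw [hneg]
    have hnone : ∀ m ∈ ups, PySem.Chars.find u m = -1 := by
      intro m hm
      exact (hall hneg).2 _ (List.mem_map.mpr ⟨m, hm, rfl⟩)
    have hfail : ∀ i ∈ List.range (u.length + 1),
        ¬ (ups.any (fun m => PySem.Chars.startswith (u.drop i) m)) = true := by
      intro i _ hany
      obtain ⟨m, hm, hsw⟩ := List.any_eq_true.mp hany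
      have hpre : m <+: u.drop i := (PySem.Chars.startswith_iff _ _).mp hsw
      exact ((PySem.Chars.find_eq_neg_one_iff u m).mp (hnone m hm)) (pvPrefixDropInfix hpre)
    rw [pvGoB_all_false u ups _ hfail]
  · -- r = find u m₀ for some m₀, minimal; B's scan stops exactly at index r
    have hrpos : 0 ≤ r := by omega
    rcases hmem with h | hmemxs
    · omega
    obtain ⟨m₀, hm₀, hfind₀⟩ := List.mem_map.mp (hxs ▸ hmemxs)
    obtain ⟨hpre₀, _⟩ := PySem.Chars.find_spec (show (0:Int) ≤ PySem.Chars.find u m₀ by omega)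
    have hrle : r ≤ u.length := hfind₀ ▸ PySem.Chars.find_le_length u m₀
    have hfailbelow : ∀ j, j < r.toNat →
        ¬ (ups.any (fun m => PySem.Chars.startswith (u.drop j) m)) = true := by
      intro j hj hany
      obtain ⟨m, hm, hsw⟩ := List.any_eq_true.mp hany
      have hpre : m <+: u.drop j := (PySem.Chars.startswith_iff _ _).mp hsw
      have hfnn : 0 ≤ PySem.Chars.find u m :=
        (PySem.Chars.find_nonneg_iff u m).mpr (pvPrefixDropInfix hpre)
      obtain ⟨_, hmin'⟩ := PySem.Chars.find_spec hfnn
      have hle : (PySem.Chars.find u m).toNat ≤ j := by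
        by_contra hlt
        exact hmin' j (by omega) hpre
      have hrlef : r ≤ PySem.Chars.find u m :=
        (hmin hneg).2 _ (List.mem_map.mpr ⟨m, hm, rfl⟩) (by omega)
      omega
    have hhold : (ups.any (fun m => PySem.Chars.startswith (u.drop r.toNat) m)) = true := by
      refine List.any_eq_true.mpr ⟨m₀, hm₀, (PySem.Chars.startswith_iff _ _).mpr ?_⟩
      have : (PySem.Chars.find u m₀).toNat = r.toNat := by rw [hfind₀]
      rw [← this]; exact hpre₀
    have hsplit : List.range (u.length + 1)
        = List.range r.toNat ++ (List.range (u.length + 1 - r.toNat)).map (r.toNat + ·) := by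
      rw [← List.range_add]; congr 1; omega
    rw [hsplit, pvGoB_append u ups _ _ (fun i hi => hfailbelow i (List.mem_range.mp hi))]
    have hk : u.length + 1 - r.toNat = (u.length - r.toNat) + 1 := by omega
    rw [hk, List.range_succ_eq_map]
    simp only [List.map_cons]
    rw [pvGoB, if_pos (by simpa using hhold)]
    omega
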